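-- pv_equiv track=rewrite | github.com/Analyst-Shiva/Python | Functions - Return functions and follows.py | Myfucntion
-- ===== SOURCE A (Python) =====
-- def Myfucntion(s):
--     x=list(s)
--     sc,n,u,l='','','',''
--     a,b,c,d = [],[],[],[]
--     for char in x:
--         if char.isnumeric():
--             b.append(char)
--         elif char.isupper():
--             c.append(char)
--         elif char.islower():
--             d.append(char)
--
--             #d.append(char)
--         else:
--             a.append(char)
--     a.sort(),b.sort(),c.sort(),d.sort()
--     return ''.join(a)+''.join(b)+''.join(c)+''.join(d)
-- ===== SOURCE B (Python) =====
-- def Myfucntion(s):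
--     # One composite-key sort instead of bucketing into four lists:
--     # key = category * 1114112 + codepoint (1114112 > any Unicode codepoint),
--     # with the same precedence as the original: numeric, upper, lower, else special.
--     def category(ch):
--         if ch.isnumeric():
--             return 1
--         if ch.isupper():
--             return 2
--         if ch.islower():
--             return 3
--         return 0
--     return ''.join(sorted(s, key=lambda ch: category(ch) * 1114112 + ord(ch)))
-- ===== Notes on version B (the rewrite author's own statement) =====
-- stated objective: idiomatic
-- what changed: Replaces the four explicit buckets (append loop, four in-place sorts, four joins) by a single sorted() call over the string with a composite key (category, codepoint) using the same classification precedence.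
import Mathlib
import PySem

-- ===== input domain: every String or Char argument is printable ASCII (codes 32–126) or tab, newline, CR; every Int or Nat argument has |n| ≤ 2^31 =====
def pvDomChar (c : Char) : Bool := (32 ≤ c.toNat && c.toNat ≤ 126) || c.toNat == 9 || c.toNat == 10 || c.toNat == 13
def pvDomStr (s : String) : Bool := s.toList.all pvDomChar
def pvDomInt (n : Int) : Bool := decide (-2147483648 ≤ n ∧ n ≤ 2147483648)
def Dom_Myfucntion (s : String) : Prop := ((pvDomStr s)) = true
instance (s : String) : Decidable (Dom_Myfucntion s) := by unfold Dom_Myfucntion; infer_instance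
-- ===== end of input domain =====

-- B replaces A's four-bucket build-sort-concatenate by one composite-key sort (idiomatic, same cost).

-- ===== PORT A =====
-- char.isnumeric() is ported as PySem.Chars.isdigit, exact on the ASCII domain (they agree on all ASCII chars).
def Myfucntion (s : String) : String :=
  let x := s.toList
  let st := x.foldl (fun (st : List Char × List Char × List Char × List Char) char =>
    match st with
    | (a, b, c, d) =>
      if PySem.Chars.isdigit char then (a, b ++ [char], c, d)
      else if PySem.Chars.isupper char then (a, b, c ++ [char], d)
      else if PySem.Chars.islower char then (a, b, c, d ++ [char])
      else (a ++ [char], b, c, d)) ([], [], [], [])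
  match st with
  | (a, b, c, d) =>
    -- ''.join(a)+''.join(b)+''.join(c)+''.join(d) on char lists = String.ofList of the concatenation
    String.ofList (PySem.List.sorted a (fun ch => ch) false ++ PySem.List.sorted b (fun ch => ch) false
      ++ PySem.List.sorted c (fun ch => ch) false ++ PySem.List.sorted d (fun ch => ch) false)

-- ===== PORT B =====
-- category(ch): same precedence as A; isnumeric ported as isdigit (exact on ASCII)
def pvCategory (ch : Char) : Int :=
  if PySem.Chars.isdigit ch then 1
  else if PySem.Chars.isupper ch then 2
  else if PySem.Chars.islower ch then 3
  else 0

-- key = category(ch) * 1114112 + ord(ch)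
def pvKey (ch : Char) : Int := pvCategory ch * 1114112 + (ch.toNat : Int)

def Myfucntion_alt (s : String) : String :=
  String.ofList (PySem.List.sorted s.toList pvKey false)

-- ===== PRECONDITION & SPEC =====
def Spec_Myfucntion (s : String) (out : String) : Prop := out = Myfucntion_alt s
instance (s : String) (out : String) : Decidable (Spec_Myfucntion s out) := by unfold Spec_Myfucntion; infer_instance

-- ===== CLAIM (what is proved, stated in full; the proofs are below) =====
def Claim_equal_Myfucntion : Prop := ∀ (s : String), Dom_Myfucntion s → Spec_Myfucntion s (Myfucntion s)

-- ===== LEMMAS AND PROOFS =====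

-- the four (disjoint, exhaustive) bucket tests, in A's branch order
def pvQ1 (c : Char) : Bool := PySem.Chars.isdigit c
def pvQ2 (c : Char) : Bool := !PySem.Chars.isdigit c && PySem.Chars.isupper c
def pvQ3 (c : Char) : Bool := !PySem.Chars.isdigit c && !PySem.Chars.isupper c && PySem.Chars.islower c
def pvQ0 (c : Char) : Bool := !PySem.Chars.isdigit c && !PySem.Chars.isupper c && !PySem.Chars.islower c

-- A's loop builds exactly the four filters
lemma pvBucket (xs : List Char) (a b c d : List Char) :
    xs.foldl (fun (st : List Char × List Char × List Char × List Char) char =>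
      match st with
      | (a, b, c, d) =>
        if PySem.Chars.isdigit char then (a, b ++ [char], c, d)
        else if PySem.Chars.isupper char then (a, b, c ++ [char], d)
        else if PySem.Chars.islower char then (a, b, c, d ++ [char])
        else (a ++ [char], b, c, d)) (a, b, c, d)
    = (a ++ xs.filter pvQ0, b ++ xs.filter pvQ1, c ++ xs.filter pvQ2, d ++ xs.filter pvQ3) := by
  induction xs generalizing a b c d with
  | nil => simp
  | cons x xs ih =>
    by_cases h1 : PySem.Chars.isdigit x
    · simp [List.foldl_cons, h1, ih, pvQ0, pvQ1, pvQ2, pvQ3]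
    · by_cases h2 : PySem.Chars.isupper x
      · simp [List.foldl_cons, h1, h2, ih, pvQ0, pvQ1, pvQ2, pvQ3]
      · by_cases h3 : PySem.Chars.islower x
        · simp [List.foldl_cons, h1, h2, h3, ih, pvQ0, pvQ1, pvQ2, pvQ3]
        · simp [List.foldl_cons, h1, h2, h3, ih, pvQ0, pvQ1, pvQ2, pvQ3]

-- the four filters partition the list
lemma pvPart (L : List Char) :
    (L.filter pvQ0 ++ L.filter pvQ1 ++ L.filter pvQ2 ++ L.filter pvQ3).Perm L := by
  induction L with
  | nil => simp
  | cons x L ih =>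
    by_cases h1 : PySem.Chars.isdigit x
    · have e0 : pvQ0 x = false := by simp [pvQ0, h1]
      have e1 : pvQ1 x = true := by simp [pvQ1, h1]
      have e2 : pvQ2 x = false := by simp [pvQ2, h1]
      have e3 : pvQ3 x = false := by simp [pvQ3, h1]
      simp only [List.filter_cons, e0, e1, e2, e3, if_true, if_false, Bool.false_eq_true]
      refine List.Perm.trans ?_ (ih.cons x)
      simp [List.append_assoc]
    · by_cases h2 : PySem.Chars.isupper x
      · have e0 : pvQ0 x = false := by simp [pvQ0, h2]
        have e1 : pvQ1 x = false := by simp [pvQ1, h1]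
        have e2 : pvQ2 x = true := by simp [pvQ2, h1, h2]
        have e3 : pvQ3 x = false := by simp [pvQ3, h2]
        simp only [List.filter_cons, e0, e1, e2, e3, if_true, if_false, Bool.false_eq_true]
        refine List.Perm.trans ?_ (ih.cons x)
        simpa [List.append_assoc] using
          List.perm_middle (a := x) (l₁ := L.filter pvQ0 ++ L.filter pvQ1) (l₂ := L.filter pvQ2 ++ L.filter pvQ3)
      · by_cases h3 : PySem.Chars.islower x
        · have e0 : pvQ0 x = false := by simp [pvQ0, h3]
          have e1 : pvQ1 x = false := by simp [pvQ1, h1]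
          have e2 : pvQ2 x = false := by simp [pvQ2, h2]
          have e3 : pvQ3 x = true := by simp [pvQ3, h1, h2, h3]
          simp only [List.filter_cons, e0, e1, e2, e3, if_true, if_false, Bool.false_eq_true]
          refine List.Perm.trans ?_ (ih.cons x)
          simpa [List.append_assoc] using
            List.perm_middle (a := x) (l₁ := L.filter pvQ0 ++ L.filter pvQ1 ++ L.filter pvQ2) (l₂ := L.filter pvQ3)
        · have e0 : pvQ0 x = true := by simp [pvQ0, h1, h2, h3]
          have e1 : pvQ1 x = false := by simp [pvQ1, h1]
          have e2 : pvQ2 x = false := by simp [pvQ2, h2]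
          have e3 : pvQ3 x = false := by simp [pvQ3, h3]
          simp only [List.filter_cons, e0, e1, e2, e3, if_true, if_false, Bool.false_eq_true]
          exact ih.cons x

lemma pvCat0 {c : Char} (h : pvQ0 c = true) : pvCategory c = 0 := by
  unfold pvQ0 at h
  simp only [Bool.and_eq_true, Bool.not_eq_true'] at h
  obtain ⟨⟨h1, h2⟩, h3⟩ := h
  simp [pvCategory, h1, h2, h3]
lemma pvCat1 {c : Char} (h : pvQ1 c = true) : pvCategory c = 1 := by
  unfold pvQ1 at h
  simp [pvCategory, h]
lemma pvCat2 {c : Char} (h : pvQ2 c = true) : pvCategory c = 2 := by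
  unfold pvQ2 at h
  simp only [Bool.and_eq_true, Bool.not_eq_true'] at h
  obtain ⟨h1, h2⟩ := h
  simp [pvCategory, h1, h2]
lemma pvCat3 {c : Char} (h : pvQ3 c = true) : pvCategory c = 3 := by
  unfold pvQ3 at h
  simp only [Bool.and_eq_true, Bool.not_eq_true'] at h
  obtain ⟨⟨h1, h2⟩, h3⟩ := h
  simp [pvCategory, h1, h2, h3]

lemma pvToNat_lt (c : Char) : c.toNat < 1114112 := by
  have h := c.valid
  unfold UInt32.isValidChar Nat.isValidChar at h
  have : c.toNat = c.val.toNat := rfl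
  rcases h with h | ⟨_, h2⟩ <;> omega

lemma pvCat_bounds (c : Char) : 0 ≤ pvCategory c ∧ pvCategory c ≤ 3 := by
  unfold pvCategory; split_ifs <;> omega

lemma pvKey_inj : Function.Injective pvKey := by
  intro a b h
  unfold pvKey at h
  have ha := pvCat_bounds a; have hb := pvCat_bounds b
  have hna : (a.toNat : Int) < 1114112 := by exact_mod_cast pvToNat_lt a
  have hnb : (b.toNat : Int) < 1114112 := by exact_mod_cast pvToNat_lt b
  have h0a : (0 : Int) ≤ a.toNat := by positivity
  have h0b : (0 : Int) ≤ b.toNat := by positivity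
  have : (a.toNat : Int) = (b.toNat : Int) := by omega
  have : a.toNat = b.toNat := by exact_mod_cast this
  exact Char.ext (UInt32.toNat_inj.mp this)

lemma pvToNat_mono {a b : Char} (h : a ≤ b) : a.toNat ≤ b.toNat := Fin.mk_le_mk.mp h

lemma pvKey_le_of_same_cat {a b : Char} (h : pvCategory a = pvCategory b) (hle : a ≤ b) :
    pvKey a ≤ pvKey b := by
  have := pvToNat_mono hle
  unfold pvKey; omega

lemma pvKey_le_of_cat_lt {a b : Char} (h : pvCategory a < pvCategory b) : pvKey a ≤ pvKey b := by
  have hna : (a.toNat : Int) < 1114112 := by exact_mod_cast pvToNat_lt a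
  have h0b : (0 : Int) ≤ b.toNat := by positivity
  unfold pvKey; omega

-- members of a sorted filter have the filter's category
lemma pvMemCat (L : List Char) (q : Char → Bool) (k : Int)
    (hq : ∀ c, q c = true → pvCategory c = k) :
    ∀ x ∈ PySem.List.sorted (L.filter q) (fun ch => ch) false, pvCategory x = k := by
  intro x hx
  rw [PySem.List.mem_sorted] at hx
  exact hq x (List.of_mem_filter hx)

-- a sorted bucket is pairwise pvKey-ordered
lemma pvBlockPairwise (L : List Char) (q : Char → Bool) (k : Int)
    (hq : ∀ c, q c = true → pvCategory c = k) :
    List.Pairwise (fun a b => pvKey a ≤ pvKey b)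
      (PySem.List.sorted (L.filter q) (fun ch => ch) false) := by
  refine (PySem.List.sorted_pairwise (L.filter q) (fun ch => ch)).imp_of_mem ?_
  intro a b ha hb hab
  exact pvKey_le_of_same_cat (by rw [pvMemCat L q k hq a ha, pvMemCat L q k hq b hb]) hab

lemma pvCross (L : List Char) (q q' : Char → Bool) (k k' : Int)
    (hq : ∀ c, q c = true → pvCategory c = k) (hq' : ∀ c, q' c = true → pvCategory c = k')
    (hkk : k < k') :
    ∀ a ∈ PySem.List.sorted (L.filter q) (fun ch => ch) false,
    ∀ b ∈ PySem.List.sorted (L.filter q') (fun ch => ch) false, pvKey a ≤ pvKey b := by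
  intro a ha b hb
  exact pvKey_le_of_cat_lt (by rw [pvMemCat L q k hq a ha, pvMemCat L q' k' hq' b hb]; exact hkk)

lemma pvMain (L : List Char) :
    PySem.List.sorted (L.filter pvQ0) (fun ch => ch) false
      ++ PySem.List.sorted (L.filter pvQ1) (fun ch => ch) false
      ++ PySem.List.sorted (L.filter pvQ2) (fun ch => ch) false
      ++ PySem.List.sorted (L.filter pvQ3) (fun ch => ch) false
    = PySem.List.sorted L pvKey false := by
  refine PySem.List.eq_of_perm_of_pairwise_le_of_injective pvKey pvKey_inj ?_ ?_ ?_
  · refine List.Perm.trans ?_ (PySem.List.sorted_perm L pvKey false).symm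
    refine List.Perm.trans ?_ (pvPart L)
    exact ((((PySem.List.sorted_perm _ _ _).append (PySem.List.sorted_perm _ _ _)).append
      (PySem.List.sorted_perm _ _ _)).append (PySem.List.sorted_perm _ _ _))
  · have b0 := pvBlockPairwise L pvQ0 0 (fun c h => pvCat0 h)
    have b1 := pvBlockPairwise L pvQ1 1 (fun c h => pvCat1 h)
    have b2 := pvBlockPairwise L pvQ2 2 (fun c h => pvCat2 h)
    have b3 := pvBlockPairwise L pvQ3 3 (fun c h => pvCat3 h)
    have c01 := pvCross L pvQ0 pvQ1 0 1 (fun c h => pvCat0 h) (fun c h => pvCat1 h) (by omega)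
    have c02 := pvCross L pvQ0 pvQ2 0 2 (fun c h => pvCat0 h) (fun c h => pvCat2 h) (by omega)
    have c03 := pvCross L pvQ0 pvQ3 0 3 (fun c h => pvCat0 h) (fun c h => pvCat3 h) (by omega)
    have c12 := pvCross L pvQ1 pvQ2 1 2 (fun c h => pvCat1 h) (fun c h => pvCat2 h) (by omega)
    have c13 := pvCross L pvQ1 pvQ3 1 3 (fun c h => pvCat1 h) (fun c h => pvCat3 h) (by omega)
    have c23 := pvCross L pvQ2 pvQ3 2 3 (fun c h => pvCat2 h) (fun c h => pvCat3 h) (by omega)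
    simp only [List.append_assoc, List.pairwise_append]
    refine ⟨b0, ⟨b1, ⟨b2, b3, c23⟩, ?_⟩, ?_⟩
    · intro a ha b hb
      rcases List.mem_append.mp hb with hb | hb
      · exact c12 a ha b hb
      · exact c13 a ha b hb
    · intro a ha b hb
      rcases List.mem_append.mp hb with hb | hb
      · exact c01 a ha b hb
      rcases List.mem_append.mp hb with hb | hb
      · exact c02 a ha b hb
      · exact c03 a ha b hb
  · exact (PySem.List.sorted_pairwise L pvKey).imp_of_mem (fun _ _ h => h)

-- ===== VERDICT (by name: the statement is the Claim_ definition above) =====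
theorem Myfucntion_spec : Claim_equal_Myfucntion := by
  intro s _
  unfold Spec_Myfucntion Myfucntion Myfucntion_alt
  simp only [pvBucket s.toList [] [] [] [], List.nil_append]
  rw [pvMain]
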